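-- pv_equiv track=rewrite | github.com/dkh1871/adventofcode_2024 | day4/day4.py | create_search_matrix
-- ===== SOURCE A (Python) =====
-- def create_search_matrix(base_matrix:list) -> list:
--
--     search_list = list()
--
--     rows,cols =len(base_matrix), len(base_matrix[0])
--
--     for i in base_matrix:
--         search_list.append(''.join(i))
--
--     #createa vertical list
--     for x in range(0,cols):
--         new_list=list()
--         for y in range(0,rows):
--             new_list.append(base_matrix[y][x])
--
--         search_list.append(''.join(new_list))
--
--     #start in top right
--     for d in range(-(rows-1), cols):
--         new_list = list()
--         for i in range(max(0,d), min(rows,cols+d)):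
--             new_list.append(base_matrix[i][i-d])
--         search_list.append(''.join(new_list))
--
--     #start in top left
--     for d in range(rows + cols -1):
--         new_list = list()
--         for i in range(max(0,d - cols + 1), min(rows, d+1)):
--             new_list.append(base_matrix[i][d-i])
--         search_list.append(''.join(new_list))
--
--     return search_list
-- ===== SOURCE B (Python) =====
-- def create_search_matrix(base_matrix: list) -> list:
--     # one sweep over all cells groups characters into column / diagonal buckets,
--     # replacing the three nested index loops of the original
--     rows, cols = len(base_matrix), len(base_matrix[0])
--     search_list = [''.join(row) for row in base_matrix]
--     by_col, diag_down, diag_up = {}, {}, {}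
--     for y in range(rows):
--         for x in range(cols):
--             ch = base_matrix[y][x]
--             by_col.setdefault(x, []).append(ch)
--             diag_down.setdefault(y - x, []).append(ch)
--             diag_up.setdefault(y + x, []).append(ch)
--     search_list += [''.join(by_col.get(x, [])) for x in range(cols)]
--     search_list += [''.join(diag_down.get(d, [])) for d in range(-(rows - 1), cols)]
--     search_list += [''.join(diag_up.get(d, [])) for d in range(rows + cols - 1)]
--     return search_list
-- ===== Notes on version B (the rewrite author's own statement) =====
-- stated objective: alternative
-- what changed: The three nested index loops of A (columns, down-diagonals, up-diagonals) are replaced by a single sweep over all cells that groups characters into dicts keyed by x, y-x and y+x, from which the same output lists are read off.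
import Mathlib
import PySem

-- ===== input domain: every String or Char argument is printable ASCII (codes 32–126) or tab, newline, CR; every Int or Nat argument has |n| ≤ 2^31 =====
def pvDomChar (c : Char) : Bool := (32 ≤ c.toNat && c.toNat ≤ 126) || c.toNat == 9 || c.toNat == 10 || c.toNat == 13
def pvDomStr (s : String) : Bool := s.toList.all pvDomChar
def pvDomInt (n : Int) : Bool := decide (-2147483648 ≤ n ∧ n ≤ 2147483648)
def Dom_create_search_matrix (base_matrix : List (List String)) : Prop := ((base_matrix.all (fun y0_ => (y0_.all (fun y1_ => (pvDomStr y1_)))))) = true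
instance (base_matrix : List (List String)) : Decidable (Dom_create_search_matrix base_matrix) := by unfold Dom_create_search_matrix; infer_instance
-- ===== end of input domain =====

-- B replaces A's three nested index loops by one sweep over all cells that groups characters
-- into dicts keyed by x, y-x and y+x (objective: alternative, same asymptotic cost).

-- shared indexing helper: base_matrix[y][x] (pyGetD default is only reached outside Pre_)
def pvCell (g : List (List String)) (y x : Int) : String :=
  PySem.List.pyGetD (PySem.List.pyGetD g y []) x ""

-- ===== PORT A =====
def create_search_matrix (base_matrix : List (List String)) : List String :=
  let rows : Int := base_matrix.length
  let cols : Int := (PySem.List.pyGetD base_matrix 0 []).length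
  let s1 : List String := base_matrix.foldl (fun acc i => acc ++ [PySem.Str.join "" i]) []
  let s2 : List String := (PySem.List.pyRange 0 cols 1).foldl (fun acc x =>
      acc ++ [PySem.Str.join "" ((PySem.List.pyRange 0 rows 1).foldl
        (fun nl y => nl ++ [pvCell base_matrix y x]) [])]) s1
  let s3 : List String := (PySem.List.pyRange (-(rows - 1)) cols 1).foldl (fun acc d =>
      acc ++ [PySem.Str.join "" ((PySem.List.pyRange (max 0 d) (min rows (cols + d)) 1).foldl
        (fun nl i => nl ++ [pvCell base_matrix i (i - d)]) [])]) s2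
  (PySem.List.pyRange 0 (rows + cols - 1) 1).foldl (fun acc d =>
      acc ++ [PySem.Str.join "" ((PySem.List.pyRange (max 0 (d - cols + 1)) (min rows (d + 1)) 1).foldl
        (fun nl i => nl ++ [pvCell base_matrix i (d - i)]) [])]) s3

-- ===== PORT B =====
def create_search_matrix_alt (base_matrix : List (List String)) : List String :=
  let rows : Int := base_matrix.length
  let cols : Int := (PySem.List.pyGetD base_matrix 0 []).length
  let s1 : List String := base_matrix.map (fun row => PySem.Str.join "" row)
  let st : PySem.Dict Int (List String) × PySem.Dict Int (List String) × PySem.Dict Int (List String) :=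
    (PySem.List.pyRange 0 rows 1).foldl (fun s y =>
      (PySem.List.pyRange 0 cols 1).foldl (fun s x =>
        (s.1.modify x [] (· ++ [pvCell base_matrix y x]),
         s.2.1.modify (y - x) [] (· ++ [pvCell base_matrix y x]),
         s.2.2.modify (y + x) [] (· ++ [pvCell base_matrix y x]))) s)
      (PySem.Dict.empty, PySem.Dict.empty, PySem.Dict.empty)
  s1 ++ (PySem.List.pyRange 0 cols 1).map (fun x => PySem.Str.join "" (st.1.getD x []))
     ++ (PySem.List.pyRange (-(rows - 1)) cols 1).map (fun d => PySem.Str.join "" (st.2.1.getD d []))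
     ++ (PySem.List.pyRange 0 (rows + cols - 1) 1).map (fun d => PySem.Str.join "" (st.2.2.getD d []))

-- ===== PRECONDITION & SPEC =====
-- Pre_ excludes exactly the inputs where the Python A raises IndexError: the empty matrix
-- (base_matrix[0]) and matrices with some row shorter than row 0 (the column/diagonal indexing).
def Pre_create_search_matrix (base_matrix : List (List String)) : Prop :=
  base_matrix ≠ [] ∧ ∀ row ∈ base_matrix, (PySem.List.pyGetD base_matrix 0 []).length ≤ row.length
instance (base_matrix : List (List String)) : Decidable (Pre_create_search_matrix base_matrix) := by
  unfold Pre_create_search_matrix; infer_instance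

def pvWitness_create_search_matrix : List (List String) := [["a", "b"], ["c", "d"]]

def Spec_create_search_matrix (base_matrix : List (List String)) (out : List String) : Prop := out = create_search_matrix_alt base_matrix
instance (base_matrix : List (List String)) (out : List String) : Decidable (Spec_create_search_matrix base_matrix out) := by unfold Spec_create_search_matrix; infer_instance

-- ===== CLAIM (what is proved, stated in full; the proofs are below) =====
def Claim_equal_create_search_matrix : Prop := ∀ (base_matrix : List (List String)), Dom_create_search_matrix base_matrix → Pre_create_search_matrix base_matrix → Spec_create_search_matrix base_matrix (create_search_matrix base_matrix)

-- ===== LEMMAS AND PROOFS =====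

-- the cell sweep order of B, as a list of (y, x) pairs
def pvGrid (rows cols : Int) : List (Int × Int) :=
  (PySem.List.pyRange 0 rows 1).flatMap (fun y => (PySem.List.pyRange 0 cols 1).map (fun x => (y, x)))

theorem pvRange_nil (a b : Int) (h : b ≤ a) : PySem.List.pyRange a b 1 = [] := by
  rw [PySem.List.pyRange_one]
  have h0 : (b - a).toNat = 0 := by omega
  simp [h0]

theorem pvFilter_beq_aux (c : Int) : ∀ (n : Nat) (a : Int),
    (PySem.List.pyRange a (a + n) 1).filter (fun x => x == c) =
      if a ≤ c ∧ c < a + n then [c] else [] := by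
  intro n
  induction n with
  | zero =>
    intro a
    rw [pvRange_nil a (a + ((0 : Nat) : Int)) (by omega), List.filter_nil,
      if_neg (by push_cast; omega)]
  | succ n ih =>
    intro a
    have hlt : a < a + ((n + 1 : Nat) : Int) := by push_cast; omega
    rw [PySem.List.pyRange_one_cons hlt, List.filter_cons]
    have hstep : (a : Int) + ((n + 1 : Nat) : Int) = (a + 1) + ((n : Nat) : Int) := by
      push_cast; ring
    rw [hstep, ih (a + 1)]
    rcases eq_or_ne a c with h | h
    · subst h
      simp only [beq_self_eq_true, if_true]
      rw [if_neg (by omega), if_pos (by omega)]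
    · rw [if_neg (by simp [h])]
      have hiff : (a + 1 ≤ c ∧ c < a + 1 + ((n : Nat) : Int)) ↔
          (a ≤ c ∧ c < a + 1 + ((n : Nat) : Int)) := by omega
      simp only [hiff]

theorem pvFilter_beq (a b c : Int) :
    (PySem.List.pyRange a b 1).filter (fun x => x == c) =
      if a ≤ c ∧ c < b then [c] else [] := by
  by_cases hab : a ≤ b
  · obtain ⟨n, hn⟩ : ∃ n : Nat, b = a + n := ⟨(b - a).toNat, by omega⟩
    subst hn
    exact pvFilter_beq_aux c n a
  · rw [pvRange_nil a b (by omega), if_neg (by omega)]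
    rfl

theorem pvFlatMap_ite {α : Type} (P : Int → Prop) [DecidablePred P] (g : Int → α) :
    ∀ (n : Nat) (a b lo hi : Int), b = a + n → a ≤ lo → hi ≤ b →
      (∀ y, a ≤ y → y < b → (P y ↔ lo ≤ y ∧ y < hi)) →
      (PySem.List.pyRange a b 1).flatMap (fun y => if P y then [g y] else []) =
        (PySem.List.pyRange lo hi 1).map g := by
  intro n
  induction n with
  | zero =>
    intro a b lo hi hb h1 h2 h
    rw [pvRange_nil a b (by omega), pvRange_nil lo hi (by omega)]
    rfl
  | succ n ih =>
    intro a b lo hi hb h1 h2 h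
    rw [PySem.List.pyRange_one_cons (by omega : a < b), List.flatMap_cons]
    by_cases hPa : P a
    · have hax := (h a (le_refl a) (by omega)).mp hPa
      have hlo : lo = a := by omega
      have hahi : a < hi := hax.2
      have h' : ∀ y, a + 1 ≤ y → y < b → (P y ↔ a + 1 ≤ y ∧ y < hi) := by
        intro y hy1 hy2
        rw [h y (by omega) hy2]
        constructor
        · rintro ⟨_, hh⟩; exact ⟨hy1, hh⟩
        · rintro ⟨_, hh⟩; exact ⟨by omega, hh⟩
      rw [if_pos hPa, ih (a + 1) b (a + 1) hi (by omega) (le_refl _) h2 h']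
      rw [hlo, PySem.List.pyRange_one_cons hahi, List.map_cons]
      rfl
    · have hna : ¬(lo ≤ a ∧ a < hi) := fun hc => hPa ((h a (le_refl a) (by omega)).mpr hc)
      have h'' : ∀ y, a + 1 ≤ y → y < b → (P y ↔ max lo (a + 1) ≤ y ∧ y < hi) := by
        intro y hy1 hy2
        rw [h y (by omega) hy2]
        constructor
        · rintro ⟨hl, hh⟩; exact ⟨by omega, hh⟩
        · rintro ⟨hl, hh⟩; exact ⟨by omega, hh⟩
      rw [if_neg hPa, List.nil_append,
        ih (a + 1) b (max lo (a + 1)) hi (by omega) (by omega) h2 h'']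
      by_cases hla : lo ≤ a
      · rw [pvRange_nil (max lo (a + 1)) hi (by omega), pvRange_nil lo hi (by omega)]
      · have hmx : max lo (a + 1) = lo := by omega
        rw [hmx]

theorem pvFlatMap_ite_range {α : Type} (P : Int → Prop) [DecidablePred P] (g : Int → α)
    (a b lo hi : Int) (hab : a ≤ b) (h1 : a ≤ lo) (h2 : hi ≤ b)
    (h : ∀ y, a ≤ y → y < b → (P y ↔ lo ≤ y ∧ y < hi)) :
    (PySem.List.pyRange a b 1).flatMap (fun y => if P y then [g y] else []) =
      (PySem.List.pyRange lo hi 1).map g :=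
  pvFlatMap_ite P g (b - a).toNat a b lo hi (by omega) h1 h2 h

-- the dict built by B's sweep under an arbitrary key function, read at key c
theorem pvKeyed_getD (m : List (List String)) (rows cols : Int) (k : Int × Int → Int) (c : Int) :
    ((pvGrid rows cols).foldl
        (fun (d : PySem.Dict Int (List String)) p => d.modify (k p) [] (· ++ [pvCell m p.1 p.2]))
        PySem.Dict.empty).getD c [] =
      ((pvGrid rows cols).filter (fun p => k p == c)).map (fun p => pvCell m p.1 p.2) := by
  have h1 : (pvGrid rows cols).foldl
        (fun (d : PySem.Dict Int (List String)) p => d.modify (k p) [] (· ++ [pvCell m p.1 p.2]))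
        PySem.Dict.empty
      = ((pvGrid rows cols).map (fun p => (k p, pvCell m p.1 p.2))).foldl
          (fun (d : PySem.Dict Int (List String)) q => d.modify q.1 [] (· ++ [q.2]))
          PySem.Dict.empty := by
    rw [List.foldl_map]
  rw [h1, PySem.Dict.getD_foldl_modify_append, PySem.Dict.getD_empty, List.nil_append,
    List.filter_map, List.map_map]
  rfl

theorem pvCol_seg (m : List (List String)) (rows cols c : Int) (_hr : 0 ≤ rows)
    (hc0 : 0 ≤ c) (hc : c < cols) :
    ((pvGrid rows cols).filter (fun p => p.2 == c)).map (fun p => pvCell m p.1 p.2) =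
      (PySem.List.pyRange 0 rows 1).map (fun y => pvCell m y c) := by
  unfold pvGrid
  rw [List.filter_flatMap, List.map_flatMap]
  have hrow : ∀ y : Int,
      (((PySem.List.pyRange 0 cols 1).map (fun x => (y, x))).filter
          (fun p => p.2 == c)).map (fun p : Int × Int => pvCell m p.1 p.2)
        = [pvCell m y c] := by
    intro y
    rw [List.filter_map, List.map_map]
    have hpred : ((fun p : Int × Int => p.2 == c) ∘ (fun x => (y, x))) =
        (fun x : Int => x == c) := rfl
    rw [hpred, pvFilter_beq 0 cols c, if_pos ⟨hc0, hc⟩]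
    rfl
  simp only [hrow]
  induction (PySem.List.pyRange 0 rows 1) with
  | nil => rfl
  | cons z zs ihz => simp [ihz]

theorem pvDown_seg (m : List (List String)) (rows cols c : Int) (hr : 0 ≤ rows) :
    ((pvGrid rows cols).filter (fun p => p.1 - p.2 == c)).map (fun p => pvCell m p.1 p.2) =
      (PySem.List.pyRange (max 0 c) (min rows (cols + c)) 1).map (fun i => pvCell m i (i - c)) := by
  unfold pvGrid
  rw [List.filter_flatMap, List.map_flatMap]
  have hrow : ∀ y : Int,
      (((PySem.List.pyRange 0 cols 1).map (fun x => (y, x))).filter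
          (fun p => p.1 - p.2 == c)).map (fun p : Int × Int => pvCell m p.1 p.2)
        = if 0 ≤ y - c ∧ y - c < cols then [pvCell m y (y - c)] else [] := by
    intro y
    rw [List.filter_map, List.map_map]
    have hpred : ∀ x ∈ PySem.List.pyRange 0 cols 1,
        (((fun p : Int × Int => p.1 - p.2 == c) ∘ (fun x => (y, x))) x) =
          ((fun x : Int => x == (y - c)) x) := by
      intro x _
      simp only [Function.comp_apply]
      rw [Bool.eq_iff_iff]
      simp only [beq_iff_eq]
      omega
    rw [List.filter_congr hpred, pvFilter_beq 0 cols (y - c),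
      apply_ite (List.map ((fun p : Int × Int => pvCell m p.1 p.2) ∘ (fun x : Int => (y, x))))]
    simp only [List.map_cons, List.map_nil, Function.comp_apply]
  simp only [hrow]
  exact pvFlatMap_ite_range (fun y => 0 ≤ y - c ∧ y - c < cols)
    (fun y => pvCell m y (y - c)) 0 rows (max 0 c) (min rows (cols + c)) hr
    (by omega) (by omega) (by intro y hy1 hy2; omega)

theorem pvUp_seg (m : List (List String)) (rows cols c : Int) (hr : 0 ≤ rows) :
    ((pvGrid rows cols).filter (fun p => p.1 + p.2 == c)).map (fun p => pvCell m p.1 p.2) =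
      (PySem.List.pyRange (max 0 (c - cols + 1)) (min rows (c + 1)) 1).map
        (fun i => pvCell m i (c - i)) := by
  unfold pvGrid
  rw [List.filter_flatMap, List.map_flatMap]
  have hrow : ∀ y : Int,
      (((PySem.List.pyRange 0 cols 1).map (fun x => (y, x))).filter
          (fun p => p.1 + p.2 == c)).map (fun p : Int × Int => pvCell m p.1 p.2)
        = if 0 ≤ c - y ∧ c - y < cols then [pvCell m y (c - y)] else [] := by
    intro y
    rw [List.filter_map, List.map_map]
    have hpred : ∀ x ∈ PySem.List.pyRange 0 cols 1,
        (((fun p : Int × Int => p.1 + p.2 == c) ∘ (fun x => (y, x))) x) =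
          ((fun x : Int => x == (c - y)) x) := by
      intro x _
      simp only [Function.comp_apply]
      rw [Bool.eq_iff_iff]
      simp only [beq_iff_eq]
      omega
    rw [List.filter_congr hpred, pvFilter_beq 0 cols (c - y),
      apply_ite (List.map ((fun p : Int × Int => pvCell m p.1 p.2) ∘ (fun x : Int => (y, x))))]
    simp only [List.map_cons, List.map_nil, Function.comp_apply]
  simp only [hrow]
  exact pvFlatMap_ite_range (fun y => 0 ≤ c - y ∧ c - y < cols)
    (fun y => pvCell m y (c - y)) 0 rows (max 0 (c - cols + 1)) (min rows (c + 1)) hr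
    (by omega) (by omega) (by intro y hy1 hy2; omega)

-- B's nested sweep is the pvGrid fold, split into its three independent dict folds
theorem pvSweep_eq (m : List (List String)) (rows cols : Int) :
    ((PySem.List.pyRange 0 rows 1).foldl (fun s y =>
      (PySem.List.pyRange 0 cols 1).foldl (fun s x =>
        (s.1.modify x [] (· ++ [pvCell m y x]),
         s.2.1.modify (y - x) [] (· ++ [pvCell m y x]),
         s.2.2.modify (y + x) [] (· ++ [pvCell m y x]))) s)
      ((PySem.Dict.empty : PySem.Dict Int (List String)),
       (PySem.Dict.empty : PySem.Dict Int (List String)),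
       (PySem.Dict.empty : PySem.Dict Int (List String))))
    = ((pvGrid rows cols).foldl
         (fun (d : PySem.Dict Int (List String)) p => d.modify p.2 [] (· ++ [pvCell m p.1 p.2]))
         PySem.Dict.empty,
       (pvGrid rows cols).foldl
         (fun (d : PySem.Dict Int (List String)) p => d.modify (p.1 - p.2) [] (· ++ [pvCell m p.1 p.2]))
         PySem.Dict.empty,
       (pvGrid rows cols).foldl
         (fun (d : PySem.Dict Int (List String)) p => d.modify (p.1 + p.2) [] (· ++ [pvCell m p.1 p.2]))
         PySem.Dict.empty) := by
  have hL : ((PySem.List.pyRange 0 rows 1).foldl (fun s y =>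
      (PySem.List.pyRange 0 cols 1).foldl (fun s x =>
        (s.1.modify x [] (· ++ [pvCell m y x]),
         s.2.1.modify (y - x) [] (· ++ [pvCell m y x]),
         s.2.2.modify (y + x) [] (· ++ [pvCell m y x]))) s)
      ((PySem.Dict.empty : PySem.Dict Int (List String)),
       (PySem.Dict.empty : PySem.Dict Int (List String)),
       (PySem.Dict.empty : PySem.Dict Int (List String))))
    = (pvGrid rows cols).foldl (fun s p =>
        (s.1.modify p.2 [] (· ++ [pvCell m p.1 p.2]),
         s.2.1.modify (p.1 - p.2) [] (· ++ [pvCell m p.1 p.2]),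
         s.2.2.modify (p.1 + p.2) [] (· ++ [pvCell m p.1 p.2])))
      ((PySem.Dict.empty : PySem.Dict Int (List String)),
       (PySem.Dict.empty : PySem.Dict Int (List String)),
       (PySem.Dict.empty : PySem.Dict Int (List String))) := by
    unfold pvGrid
    rw [List.foldl_flatMap]
    simp only [List.foldl_map]
  rw [hL]
  rw [PySem.List.foldl_prod_mk
    (f := fun (d : PySem.Dict Int (List String)) (p : Int × Int) =>
      d.modify p.2 [] (· ++ [pvCell m p.1 p.2]))
    (g := fun (t : PySem.Dict Int (List String) × PySem.Dict Int (List String)) (p : Int × Int) =>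
      (t.1.modify (p.1 - p.2) [] (· ++ [pvCell m p.1 p.2]),
       t.2.modify (p.1 + p.2) [] (· ++ [pvCell m p.1 p.2])))]
  rw [PySem.List.foldl_prod_mk
    (f := fun (d : PySem.Dict Int (List String)) (p : Int × Int) =>
      d.modify (p.1 - p.2) [] (· ++ [pvCell m p.1 p.2]))
    (g := fun (d : PySem.Dict Int (List String)) (p : Int × Int) =>
      d.modify (p.1 + p.2) [] (· ++ [pvCell m p.1 p.2]))]

theorem pvB_eq (m : List (List String)) :
    create_search_matrix_alt m =
      m.map (fun row => PySem.Str.join "" row)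
      ++ (PySem.List.pyRange 0 ((PySem.List.pyGetD m 0 []).length : Int) 1).map (fun x =>
           PySem.Str.join ""
             (((pvGrid (m.length : Int) ((PySem.List.pyGetD m 0 []).length : Int)).filter
                 (fun p => p.2 == x)).map (fun p => pvCell m p.1 p.2)))
      ++ (PySem.List.pyRange (-((m.length : Int) - 1)) ((PySem.List.pyGetD m 0 []).length : Int) 1).map (fun d =>
           PySem.Str.join ""
             (((pvGrid (m.length : Int) ((PySem.List.pyGetD m 0 []).length : Int)).filter
                 (fun p => p.1 - p.2 == d)).map (fun p => pvCell m p.1 p.2)))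
      ++ (PySem.List.pyRange 0 ((m.length : Int) + ((PySem.List.pyGetD m 0 []).length : Int) - 1) 1).map (fun d =>
           PySem.Str.join ""
             (((pvGrid (m.length : Int) ((PySem.List.pyGetD m 0 []).length : Int)).filter
                 (fun p => p.1 + p.2 == d)).map (fun p => pvCell m p.1 p.2))) := by
  unfold create_search_matrix_alt
  simp only [pvSweep_eq m]
  simp only [pvKeyed_getD m]

-- ===== VERDICT (by name: the statement is the Claim_ definition above) =====
set_option maxHeartbeats 2000000 in
theorem create_search_matrix_spec : Claim_equal_create_search_matrix := by
  intro m _ _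
  show create_search_matrix m = create_search_matrix_alt m
  rw [pvB_eq]
  unfold create_search_matrix
  simp only [PySem.List.foldl_append_singleton_eq_map, List.nil_append, List.append_assoc]
  have hr0 : (0 : Int) ≤ (m.length : Int) := Int.natCast_nonneg _
  congr 1
  congr 1
  · apply List.map_congr_left
    intro x hx
    obtain ⟨hx0, hxc⟩ := (PySem.List.mem_pyRange_one).mp hx
    rw [pvCol_seg m (m.length : Int) ((PySem.List.pyGetD m 0 []).length : Int) x hr0 hx0 hxc]
  congr 1
  · apply List.map_congr_left
    intro d _
    rw [pvDown_seg m (m.length : Int) ((PySem.List.pyGetD m 0 []).length : Int) d hr0]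
  · apply List.map_congr_left
    intro d _
    rw [pvUp_seg m (m.length : Int) ((PySem.List.pyGetD m 0 []).length : Int) d hr0]
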